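-- pv_equiv track=rewrite | github.com/cdccnleo/RQA2025 | src/gateway/api/api_gateway.py | _match_route
-- ===== SOURCE A (Python) =====
-- def _match_route(request_path: str, route_pattern: str) -> bool:
--     """
--     Match request path with route pattern
--     将请求路径与路由模式匹配
--
--     Args:
--         request_path: Actual request path
--                      实际请求路径
--         route_pattern: Route pattern (supports wildcards)
--                       路由模式（支持通配符）
--
--     Returns:
--         bool: Match status
--               匹配状态
--     """
--     # Simple wildcard matching
--     if '*' in route_pattern:
--         pattern_parts = route_pattern.split('/')
--         request_parts = request_path.split('/')
--
--         if len(pattern_parts) != len(request_parts):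
--             return False
--
--         for pattern_part, request_part in zip(pattern_parts, request_parts):
--             if pattern_part != '*' and pattern_part != request_part:
--                 return False
--
--         return True
--
--     # Exact match
--     return request_path == route_pattern
-- ===== SOURCE B (Python) =====
-- def _match_route(request_path: str, route_pattern: str) -> bool:
--     # One-pass character scanner: walks path and pattern in parallel, segment by
--     # segment, treating a pattern segment that is exactly '*' as a wildcard.
--     # No splitting, no intermediate lists.
--     p, r = request_path, route_pattern
--     n, m = len(p), len(r)
--     i = j = 0
--     while True:
--         if j < m and r[j] == '*' and (j + 1 == m or r[j + 1] == '/'):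
--             # wildcard segment: skip the current path segment
--             j += 1
--             while i < n and p[i] != '/':
--                 i += 1
--         else:
--             # literal segment: compare character by character
--             while i < n and j < m and p[i] == r[j] and p[i] != '/':
--                 i += 1
--                 j += 1
--             if i < n and p[i] != '/':
--                 return False
--             if j < m and r[j] != '/':
--                 return False
--         if i == n and j == m:
--             return True
--         if i == n or j == m:
--             return False
--         i += 1
--         j += 1
-- ===== Notes on version B (the rewrite author's own statement) =====
-- stated objective: alternative
-- what changed: Replaces A's split-into-segment-lists + '*'-membership branch + zip loop by a single-pass two-pointer character scanner that matches path and pattern segment by segment in place, with no splitting, no intermediate lists and no separate exact-match branch.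
import Mathlib
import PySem

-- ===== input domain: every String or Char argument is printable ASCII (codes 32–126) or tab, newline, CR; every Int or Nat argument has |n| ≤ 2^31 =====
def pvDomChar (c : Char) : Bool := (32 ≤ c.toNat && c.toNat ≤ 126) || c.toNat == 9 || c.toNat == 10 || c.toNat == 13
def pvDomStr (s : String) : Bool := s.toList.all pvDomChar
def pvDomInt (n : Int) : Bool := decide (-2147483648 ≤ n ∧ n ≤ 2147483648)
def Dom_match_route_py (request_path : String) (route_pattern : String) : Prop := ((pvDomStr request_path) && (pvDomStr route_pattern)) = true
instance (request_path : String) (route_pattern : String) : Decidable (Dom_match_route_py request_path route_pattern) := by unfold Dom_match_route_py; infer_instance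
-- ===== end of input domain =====

-- B replaces A's split-into-segment-lists + '*'-membership branch + zip loop by a
-- single-pass two-pointer character scanner over both strings (alternative, same cost).


-- ===== PORT A =====
-- A's for-loop over zip(pattern_parts, request_parts) with early return False
def aLoopA : List (List Char × List Char) → Bool
  | [] => true
  | (pp, rp) :: rest => if pp ≠ ['*'] ∧ pp ≠ rp then false else aLoopA rest


def match_route_py (request_path : String) (route_pattern : String) : Bool :=
  if PySem.Str.isIn "*" route_pattern then
    let pattern_parts := PySem.Chars.splitOn route_pattern.toList ['/']
    let request_parts := PySem.Chars.splitOn request_path.toList ['/']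
    if pattern_parts.length ≠ request_parts.length then false
    else aLoopA (pattern_parts.zip request_parts)
  else request_path == route_pattern

-- ===== PORT B =====
-- Source B's inner skip / compare loops, one outer-loop body step, and the outer loop;
-- bEatLit_snd_length / bStep_snd_length are termination facts cited in bLoop's decreasing_by
def bSkipSeg : List Char → List Char
  | [] => []
  | c :: cs => if c = '/' then c :: cs else bSkipSeg cs
def bEatLit : List Char → List Char → List Char × List Char
  | c :: p', d :: r' => if c = d ∧ c ≠ '/' then bEatLit p' r' else (c :: p', d :: r')
  | p, r => (p, r)
def bLit (p r : List Char) : Option (List Char × List Char) :=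
  if ((bEatLit p r).1 ≠ [] ∧ (bEatLit p r).1.head? ≠ some '/') ∨ ((bEatLit p r).2 ≠ [] ∧ (bEatLit p r).2.head? ≠ some '/') then none
  else some (bEatLit p r)
def bStep (p r : List Char) : Option (List Char × List Char) :=
  match r with
  | '*' :: r' =>
    if r' = [] ∨ r'.head? = some '/' then some (bSkipSeg p, r')
    else bLit p r
  | _ => bLit p r
theorem bEatLit_snd_length (p r : List Char) : (bEatLit p r).2.length ≤ r.length := by
  fun_induction bEatLit p r with
  | case1 c p' d r' h ih => simpa using le_trans ih (by simp)
  | case2 c p' d r' h => simp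
  | case3 p r h => simp
theorem bStep_snd_length {p r p' r' : List Char} (h : bStep p r = some (p', r')) :
    r'.length ≤ r.length := by
  have hlit : ∀ (q s : List Char), bLit q s = some (p', r') → r'.length ≤ s.length := by
    intro q s hq
    unfold bLit at hq
    split at hq
    · simp at hq
    · simp only [Option.some.injEq, Prod.ext_iff] at hq
      rw [← hq.2]
      exact bEatLit_snd_length q s
  unfold bStep at h
  split at h
  · split at h
    · simp only [Option.some.injEq, Prod.mk.injEq] at h
      obtain ⟨-, h2⟩ := h
      subst h2; simp
    · exact hlit _ _ h
  · exact hlit _ _ h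
def bLoop (p r : List Char) : Bool :=
  match h : bStep p r with
  | none => false
  | some (p', r') =>
    match p', r' with
    | [], [] => true
    | [], _ :: _ => false
    | _ :: _, [] => false
    | _ :: p'', _ :: r'' => bLoop p'' r''
termination_by r.length
decreasing_by
  have := bStep_snd_length h
  simp at this
  omega


def match_route_py_alt (request_path : String) (route_pattern : String) : Bool :=
  bLoop request_path.toList route_pattern.toList

-- ===== PRECONDITION & SPEC =====
def Spec_match_route_py (request_path : String) (route_pattern : String) (out : Bool) : Prop := out = match_route_py_alt request_path route_pattern
instance (request_path : String) (route_pattern : String) (out : Bool) : Decidable (Spec_match_route_py request_path route_pattern out) := by unfold Spec_match_route_py; infer_instance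

-- ===== CLAIM (what is proved, stated in full; the proofs are below) =====
def Claim_equal_match_route_py : Prop := ∀ (request_path : String) (route_pattern : String), Dom_match_route_py request_path route_pattern → Spec_match_route_py request_path route_pattern (match_route_py request_path route_pattern)

-- ===== LEMMAS AND PROOFS =====

-- split1 is a simple structural model of s.split('/'); splitOn_eq identifies it with PySem's splitOn
def split1 : List Char → List (List Char)
  | [] => [[]]
  | c :: cs =>
    if c = '/' then [] :: split1 cs
    else match split1 cs with
         | [] => [[c]]
         | h :: t => (c :: h) :: t

theorem split1_ne_nil (cs : List Char) : split1 cs ≠ [] := by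
  cases cs with
  | nil => simp [split1]
  | cons c cs =>
    simp only [split1]
    split
    · simp
    · split <;> simp

def consHead (x : List Char) : List (List Char) → List (List Char)
  | [] => [x]
  | h :: t => (x ++ h) :: t

theorem splitOn_go_eq (fuel : Nat) (l : List Char) (hl : l.length ≤ fuel)
    (cur : List Char) (acc : List (List Char)) :
    PySem.Chars.splitOn.go ['/'] fuel l cur acc
      = acc.reverse ++ consHead cur.reverse (split1 l) := by
  induction fuel generalizing l cur acc with
  | zero =>
    have : l = [] := by cases l <;> simp_all
    subst this
    simp [PySem.Chars.splitOn.go, split1, consHead]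
  | succ fuel ih =>
    cases l with
    | nil => simp [PySem.Chars.splitOn.go, split1, consHead]
    | cons c rest =>
      have hlen : rest.length ≤ fuel := by simp at hl; omega
      by_cases hc : c = '/'
      · subst hc
        rw [show PySem.Chars.splitOn.go ['/'] (fuel+1) ('/' :: rest) cur acc
              = PySem.Chars.splitOn.go ['/'] fuel rest [] (cur.reverse :: acc) by
            simp [PySem.Chars.splitOn.go, List.isPrefixOf]]
        rw [ih rest hlen [] (cur.reverse :: acc)]
        have hne := split1_ne_nil rest
        cases hsp : split1 rest with
        | nil => exact absurd hsp hne
        | cons h t => simp [split1, consHead, hsp]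
      · rw [show PySem.Chars.splitOn.go ['/'] (fuel+1) (c :: rest) cur acc
              = PySem.Chars.splitOn.go ['/'] fuel rest (c :: cur) acc by
            have hc' : ¬ ('/' = c) := fun h => hc h.symm
            simp [PySem.Chars.splitOn.go, List.isPrefixOf, hc']]
        rw [ih rest hlen (c :: cur) acc]
        have hne := split1_ne_nil rest
        cases hsp : split1 rest with
        | nil => exact absurd hsp hne
        | cons h t => simp [split1, consHead, hsp, hc]

theorem splitOn_eq (cs : List Char) : PySem.Chars.splitOn cs ['/'] = split1 cs := by
  unfold PySem.Chars.splitOn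
  rw [splitOn_go_eq (cs.length + 1) cs (by omega) [] []]
  have hne := split1_ne_nil cs
  cases hsp : split1 cs with
  | nil => exact absurd hsp hne
  | cons h t => simp [consHead]

def aSeg (pp rp : List (List Char)) : Bool :=
  if pp.length ≠ rp.length then false else aLoopA (pp.zip rp)

theorem aSeg_cons (x y : List Char) (xs ys : List (List Char)) :
    aSeg (x :: xs) (y :: ys) = if x = ['*'] ∨ x = y then aSeg xs ys else false := by
  by_cases h : x = ['*'] ∨ x = y
  · have hx : ¬ (x ≠ ['*'] ∧ x ≠ y) := by tauto
    simp only [aSeg, aLoopA, if_pos h, List.zip_cons_cons, List.length_cons, if_neg hx]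
    by_cases hl : xs.length = ys.length <;> simp [hl]
  · push_neg at h
    simp [aSeg, aLoopA, h.1, h.2]

theorem aSeg_nil_cons (y : List Char) (ys : List (List Char)) : aSeg [] (y :: ys) = false := by
  simp [aSeg]
theorem aSeg_cons_nil (x : List Char) (xs : List (List Char)) : aSeg (x :: xs) [] = false := by
  simp [aSeg]

theorem split1_take_drop (cs : List Char) :
    split1 cs = cs.takeWhile (· ≠ '/')
      :: (match cs.dropWhile (· ≠ '/') with | [] => [] | _ :: rest => split1 rest) := by
  induction cs with
  | nil => simp [split1]
  | cons c cs ih =>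
    by_cases hc : c = '/'
    · subst hc; simp [split1, List.takeWhile, List.dropWhile]
    · rw [show split1 (c :: cs) = (match split1 cs with
            | [] => [[c]] | h :: t => (c :: h) :: t) by simp [split1, hc]]
      rw [ih]
      simp [List.takeWhile, List.dropWhile, hc]

theorem bSkipSeg_eq (p : List Char) : bSkipSeg p = p.dropWhile (· ≠ '/') := by
  induction p with
  | nil => simp [bSkipSeg]
  | cons c cs ih =>
    by_cases hc : c = '/' <;> simp [bSkipSeg, List.dropWhile, hc, ih]

theorem bLit_eq (p r : List Char) :
    bLit p r = if p.takeWhile (· ≠ '/') = r.takeWhile (· ≠ '/')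
               then some (p.dropWhile (· ≠ '/'), r.dropWhile (· ≠ '/')) else none := by
  fun_induction bEatLit p r with
  | case1 c p' d r' h ih =>
    obtain ⟨hcd, hc⟩ := h
    subst hcd
    have hstep : bLit (c :: p') (c :: r') = bLit p' r' := by
      simp [bLit, bEatLit, hc]
    rw [hstep, ih]
    simp [List.takeWhile, List.dropWhile, hc]
  | case2 c p' d r' h =>
    have h' : ¬ (c = d ∧ c ≠ '/') := h
    by_cases hc : c = '/'
    · subst hc
      by_cases hd : d = '/'
      · subst hd
        simp [bLit, bEatLit, List.takeWhile, List.dropWhile]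
      · have hd' : ¬ (d ≠ '/') = False := by simp [hd]
        simp [bLit, bEatLit, List.takeWhile, List.dropWhile, hd, h']
    · have hcd : c ≠ d := fun hx => h' ⟨hx, hc⟩
      by_cases hd : d = '/' <;>
        simp [bLit, bEatLit, List.takeWhile, List.dropWhile, hc, hd, hcd, h']
  | case3 p r h =>
    cases p with
    | nil =>
      cases r with
      | nil => simp [bLit, bEatLit]
      | cons d r' =>
        by_cases hd : d = '/' <;>
          simp [bLit, bEatLit, List.takeWhile, List.dropWhile, hd]
    | cons c p' =>
      cases r with
      | nil =>
        by_cases hc : c = '/' <;>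
          simp [bLit, bEatLit, List.takeWhile, List.dropWhile, hc]
      | cons d r' => exact absurd (h c p' d r' rfl rfl) (fun hx => hx)


theorem guard_iff (r : List Char) :
    (∃ r', r = '*' :: r' ∧ (r' = [] ∨ r'.head? = some '/'))
      ↔ r.takeWhile (· ≠ '/') = ['*'] := by
  cases r with
  | nil => simp
  | cons c r' =>
    by_cases hc : c = '/'
    · subst hc; simp [List.takeWhile]
    · cases r' with
      | nil => simp [List.takeWhile, hc]; try tauto
      | cons d r'' =>
        by_cases hd : d = '/' <;>
          simp [List.takeWhile, hc, hd] <;> try tauto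

theorem bStep_eq (p r : List Char) :
    bStep p r = if r.takeWhile (· ≠ '/') = ['*'] ∨ p.takeWhile (· ≠ '/') = r.takeWhile (· ≠ '/')
                then some (p.dropWhile (· ≠ '/'), r.dropWhile (· ≠ '/')) else none := by
  by_cases hg : r.takeWhile (· ≠ '/') = ['*']
  · obtain ⟨r', rfl, hr'⟩ := (guard_iff r).2 hg
    have hb : bStep p ('*' :: r') = some (bSkipSeg p, r') := by
      simp [bStep, hr']
    rw [hb, bSkipSeg_eq, if_pos (Or.inl hg)]
    have : ('*' :: r').dropWhile (· ≠ '/') = r' := by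
      rcases hr' with h1 | h1
      · subst h1; simp [List.dropWhile]
      · cases r' with
        | nil => simp at h1
        | cons d r'' =>
          simp at h1
          subst h1
          simp [List.dropWhile]
    rw [this]
  · have hb : bStep p r = bLit p r := by
      unfold bStep
      cases r with
      | nil => rfl
      | cons c r' =>
        by_cases hc : c = '*'
        · subst hc
          have : ¬ (r' = [] ∨ r'.head? = some '/') := by
            intro hx
            exact hg ((guard_iff ('*' :: r')).1 ⟨r', rfl, hx⟩)
          simp [this]
        · cases hcc : c <;> simp_all [bStep]
    rw [hb, bLit_eq]
    by_cases htw : p.takeWhile (· ≠ '/') = r.takeWhile (· ≠ '/')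
    · rw [if_pos htw, if_pos (Or.inr htw)]
    · rw [if_neg htw, if_neg (by rintro (h1 | h1); exact hg h1; exact htw h1)]

theorem bLoop_eq_aSeg (p r : List Char) : bLoop p r = aSeg (split1 r) (split1 p) := by
  fun_induction bLoop p r with
  | case1 p r h =>
    rw [bStep_eq] at h
    split at h
    · simp at h
    · rename_i hcond
      rw [split1_take_drop r, split1_take_drop p, aSeg_cons]
      rw [if_neg (by rintro (h1 | h1); exact hcond (Or.inl h1); exact hcond (Or.inr h1.symm))]
  | case2 p r h h' =>
    rw [bStep_eq] at h
    split at h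
    · rename_i hcond
      simp only [Option.some.injEq, Prod.mk.injEq] at h
      rw [split1_take_drop r, split1_take_drop p, h.1, h.2, aSeg_cons]
      rw [if_pos (by rcases hcond with h1 | h1; exact Or.inl h1; exact Or.inr h1.symm)]
      rfl
    · simp at h
  | case3 p r w ws h h' =>
    rw [bStep_eq] at h
    split at h
    · simp only [Option.some.injEq, Prod.mk.injEq] at h
      rw [split1_take_drop r, split1_take_drop p, h.1, h.2, aSeg_cons]
      have hne := split1_ne_nil ws
      split
      · cases hsp : split1 ws with
        | nil => exact absurd hsp hne
        | cons a b =>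
          show false = aSeg (split1 ws) []
          rw [hsp, aSeg_cons_nil]
      · rfl
    · simp at h
  | case4 p r w ws h h' =>
    rw [bStep_eq] at h
    split at h
    · simp only [Option.some.injEq, Prod.mk.injEq] at h
      rw [split1_take_drop r, split1_take_drop p, h.1, h.2, aSeg_cons]
      have hne := split1_ne_nil ws
      split
      · cases hsp : split1 ws with
        | nil => exact absurd hsp hne
        | cons a b =>
          show false = aSeg [] (split1 ws)
          rw [hsp, aSeg_nil_cons]
      · rfl
    · simp at h
  | case5 p r c p'' d r'' h h' ih =>
    rw [bStep_eq] at h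
    split at h
    · rename_i hcond
      simp only [Option.some.injEq, Prod.mk.injEq] at h
      rw [split1_take_drop r, split1_take_drop p, h.1, h.2, aSeg_cons]
      rw [if_pos (by rcases hcond with h1 | h1; exact Or.inl h1; exact Or.inr h1.symm)]
      exact ih
    · simp at h

theorem split1_chars {cs seg : List Char} (hseg : seg ∈ split1 cs) {c : Char}
    (hc : c ∈ seg) : c ∈ cs := by
  induction cs generalizing seg with
  | nil => simp [split1] at hseg; subst hseg; simp at hc
  | cons a cs ih =>
    by_cases ha : a = '/'
    · subst ha
      rw [show split1 ('/' :: cs) = [] :: split1 cs by simp [split1]] at hseg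
      rcases List.mem_cons.1 hseg with rfl | hseg
      · simp at hc
      · exact List.mem_cons_of_mem _ (ih hseg hc)
    · have hne := split1_ne_nil cs
      cases hsp : split1 cs with
      | nil => exact absurd hsp hne
      | cons h t =>
        rw [show split1 (a :: cs) = (a :: h) :: t by simp [split1, ha, hsp]] at hseg
        rcases List.mem_cons.1 hseg with rfl | hseg
        · rcases List.mem_cons.1 hc with rfl | hc
          · exact List.mem_cons_self
          · exact List.mem_cons_of_mem _ (ih (hsp ▸ List.mem_cons_self) hc)
        · exact List.mem_cons_of_mem _ (ih (hsp ▸ List.mem_cons_of_mem _ hseg) hc)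

theorem split1_no_star {cs : List Char} (h : '*' ∉ cs) :
    ∀ seg ∈ split1 cs, seg ≠ ['*'] := by
  intro seg hseg hstar
  exact h (split1_chars hseg (by simp [hstar]))

theorem aSeg_no_star {xs : List (List Char)} (ys : List (List Char))
    (h : ∀ seg ∈ xs, seg ≠ ['*']) : aSeg xs ys = decide (xs = ys) := by
  induction xs generalizing ys with
  | nil => cases ys <;> simp [aSeg, aLoopA]
  | cons x xs ih =>
    cases ys with
    | nil => simp [aSeg]
    | cons y ys =>
      rw [aSeg_cons]
      have hx : x ≠ ['*'] := h x List.mem_cons_self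
      by_cases hxy : x = y
      · rw [if_pos (Or.inr hxy), ih ys (fun s hs => h s (List.mem_cons_of_mem _ hs))]
        subst hxy; simp
      · rw [if_neg (by rintro (h1 | h1); exact hx h1; exact hxy h1)]
        simp [hxy]

def join1 : List (List Char) → List Char
  | [] => []
  | [h] => h
  | h :: h' :: t => h ++ '/' :: join1 (h' :: t)

theorem join1_cons_cons (c : Char) (h : List Char) (t : List (List Char)) :
    join1 ((c :: h) :: t) = c :: join1 (h :: t) := by
  cases t with
  | nil => simp [join1]
  | cons h' t' => simp [join1]

theorem join1_split1 (cs : List Char) : join1 (split1 cs) = cs := by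
  induction cs with
  | nil => simp [join1, split1]
  | cons c cs ih =>
    by_cases hc : c = '/'
    · subst hc
      have hne := split1_ne_nil cs
      cases hsp : split1 cs with
      | nil => exact absurd hsp hne
      | cons h t =>
        rw [show split1 ('/' :: cs) = [] :: h :: t by simp [split1, hsp]]
        rw [show join1 ([] :: h :: t) = [] ++ '/' :: join1 (h :: t) by simp [join1]]
        rw [hsp] at ih
        simp [ih]
    · have hne := split1_ne_nil cs
      cases hsp : split1 cs with
      | nil => exact absurd hsp hne
      | cons h t =>
        rw [show split1 (c :: cs) = (c :: h) :: t by simp [split1, hc, hsp]]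
        rw [join1_cons_cons, ← hsp, ih]

theorem split1_inj {a b : List Char} (h : split1 a = split1 b) : a = b := by
  rw [← join1_split1 a, ← join1_split1 b, h]

theorem star_not_mem {r : String} (h : ¬ PySem.Str.isIn "*" r = true) : '*' ∉ r.toList := by
  intro hmem
  obtain ⟨s, t, heq⟩ := List.append_of_mem hmem
  exact h ((PySem.Str.isIn_iff_infix "*" r).2 ⟨s, t, by rw [show ("*" : String).toList = ['*'] from rfl, heq]; simp⟩)

theorem main_eq (p r : String) : match_route_py p r = match_route_py_alt p r := by
  unfold match_route_py match_route_py_alt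
  rw [bLoop_eq_aSeg]
  by_cases h : PySem.Str.isIn "*" r = true
  · rw [if_pos h, splitOn_eq, splitOn_eq]
    rfl
  · rw [if_neg h]
    have hstar : '*' ∉ r.toList := star_not_mem h
    rw [aSeg_no_star _ (split1_no_star hstar)]
    by_cases hpr : p = r
    · subst hpr; simp
    · have hsp : split1 r.toList ≠ split1 p.toList := by
        intro he
        exact hpr (String.ext (by simpa [String.toList] using (split1_inj he).symm))
      simp [hpr, hsp]

-- ===== VERDICT (by name: the statement is the Claim_ definition above) =====
theorem match_route_py_spec : Claim_equal_match_route_py := by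
  intro p r _
  unfold Spec_match_route_py
  exact main_eq p r
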